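-- pv_equiv track=rewrite | github.com/Wongsawat/teda | extract_reference_type_code_data.py | categorize_reference_type
-- ===== SOURCE A (Python) =====
-- def categorize_reference_type(code, name, description):
--     """Categorize reference type codes based on their purpose"""
--
--     text = (name + ' ' + description).lower()
--
--     # Check for Thai extensions first
--     if code.startswith('T') or code in ['80', '81', '380', '388']:
--         return 'Thai Extension'
--
--     # Define categories based on common patterns
--     if any(word in text for word in ['invoice', 'bill', 'credit note', 'debit note']):
--         return 'Invoice/Billing'
--     elif any(word in text for word in ['order', 'purchase order', 'quotation', 'offer']):
--         return 'Order'
--     elif any(word in text for word in ['delivery', 'despatch', 'shipment', 'waybill', 'consignment']):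
--         return 'Delivery/Shipment'
--     elif any(word in text for word in ['contract', 'agreement', 'tender']):
--         return 'Contract'
--     elif any(word in text for word in ['payment', 'remittance', 'credit', 'debit card', 'bank']):
--         return 'Payment'
--     elif any(word in text for word in ['customs', 'import', 'export', 'tariff', 'declaration']):
--         return 'Customs'
--     elif any(word in text for word in ['licence', 'license', 'permit', 'certificate', 'authorization']):
--         return 'License/Permit'
--     elif any(word in text for word in ['transport', 'carrier', 'freight', 'cargo']):
--         return 'Transport'
--     elif any(word in text for word in ['insurance', 'policy', 'claim']):
--         return 'Insurance'
--     elif any(word in text for word in ['warehouse', 'storage', 'inventory']):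
--         return 'Warehouse'
--     elif any(word in text for word in ['packing', 'packaging', 'container']):
--         return 'Packaging'
--     elif any(word in text for word in ['party', 'customer', 'supplier', 'buyer', 'seller']):
--         return 'Party Identification'
--     elif any(word in text for word in ['product', 'item', 'goods', 'article', 'commodity']):
--         return 'Product'
--     elif any(word in text for word in ['specification', 'drawing', 'design', 'plan']):
--         return 'Technical Document'
--     elif any(word in text for word in ['test', 'inspection', 'quality', 'analysis']):
--         return 'Quality/Testing'
--     elif any(word in text for word in ['tax', 'duty', 'vat']):
--         return 'Tax'
--     elif any(word in text for word in ['account', 'financial', 'statement']):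
--         return 'Financial'
--     else:
--         return 'Other Reference'
-- ===== SOURCE B (Python) =====
-- _LABELS = [
--     'Invoice/Billing', 'Order', 'Delivery/Shipment', 'Contract', 'Payment',
--     'Customs', 'License/Permit', 'Transport', 'Insurance', 'Warehouse',
--     'Packaging', 'Party Identification', 'Product', 'Technical Document',
--     'Quality/Testing', 'Tax', 'Financial',
-- ]
--
-- # flat keyword -> priority index (index into _LABELS)
-- _KEYWORDS = [
--     ('invoice', 0), ('bill', 0), ('credit note', 0), ('debit note', 0),
--     ('order', 1), ('purchase order', 1), ('quotation', 1), ('offer', 1),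
--     ('delivery', 2), ('despatch', 2), ('shipment', 2), ('waybill', 2), ('consignment', 2),
--     ('contract', 3), ('agreement', 3), ('tender', 3),
--     ('payment', 4), ('remittance', 4), ('credit', 4), ('debit card', 4), ('bank', 4),
--     ('customs', 5), ('import', 5), ('export', 5), ('tariff', 5), ('declaration', 5),
--     ('licence', 6), ('license', 6), ('permit', 6), ('certificate', 6), ('authorization', 6),
--     ('transport', 7), ('carrier', 7), ('freight', 7), ('cargo', 7),
--     ('insurance', 8), ('policy', 8), ('claim', 8),
--     ('warehouse', 9), ('storage', 9), ('inventory', 9),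
--     ('packing', 10), ('packaging', 10), ('container', 10),
--     ('party', 11), ('customer', 11), ('supplier', 11), ('buyer', 11), ('seller', 11),
--     ('product', 12), ('item', 12), ('goods', 12), ('article', 12), ('commodity', 12),
--     ('specification', 13), ('drawing', 13), ('design', 13), ('plan', 13),
--     ('test', 14), ('inspection', 14), ('quality', 14), ('analysis', 14),
--     ('tax', 15), ('duty', 15), ('vat', 15),
--     ('account', 16), ('financial', 16), ('statement', 16),
-- ]
--
-- def categorize_reference_type(code, name, description):
--     """Categorize reference type codes based on their purpose"""
--     if code.startswith('T') or code in ('80', '81', '380', '388'):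
--         return 'Thai Extension'
--     text = (name + ' ' + description).lower()
--     hits = [i for (w, i) in _KEYWORDS if w in text]
--     return _LABELS[min(hits)] if hits else 'Other Reference'
-- ===== Notes on version B (the rewrite author's own statement) =====
-- stated objective: alternative
-- what changed: Replaces the first-match elif chain over category keyword groups by a two-phase approach: one exhaustive scan over a flat keyword->priority-index map collecting ALL matching priorities, then min() over the collected indices selects the category label.
import Mathlib
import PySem

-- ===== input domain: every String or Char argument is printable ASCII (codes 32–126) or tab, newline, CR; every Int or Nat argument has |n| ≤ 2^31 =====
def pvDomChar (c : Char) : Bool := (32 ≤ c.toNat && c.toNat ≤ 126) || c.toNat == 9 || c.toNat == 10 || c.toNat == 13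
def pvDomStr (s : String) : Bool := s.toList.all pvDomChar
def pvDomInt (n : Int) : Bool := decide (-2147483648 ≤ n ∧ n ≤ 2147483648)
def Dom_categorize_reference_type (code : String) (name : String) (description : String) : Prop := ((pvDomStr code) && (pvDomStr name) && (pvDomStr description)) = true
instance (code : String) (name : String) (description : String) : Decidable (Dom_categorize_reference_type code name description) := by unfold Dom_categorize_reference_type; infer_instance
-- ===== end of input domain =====

-- B replaces A's first-match elif chain by a two-phase algorithm: collect ALL matching priorities from a flat keyword map, then take min (alternative, same cost).

-- ===== PORT A =====
def categorize_reference_type (code : String) (name : String) (description : String) : String :=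
  let text := PySem.Str.lower (name ++ " " ++ description)
  if PySem.Str.startswith code "T" || (["80", "81", "380", "388"] : List String).contains code then
    "Thai Extension"
  else if (["invoice", "bill", "credit note", "debit note"] : List String).any (fun word => PySem.Str.isIn word text) then
    "Invoice/Billing"
  else if (["order", "purchase order", "quotation", "offer"] : List String).any (fun word => PySem.Str.isIn word text) then
    "Order"
  else if (["delivery", "despatch", "shipment", "waybill", "consignment"] : List String).any (fun word => PySem.Str.isIn word text) then
    "Delivery/Shipment"
  else if (["contract", "agreement", "tender"] : List String).any (fun word => PySem.Str.isIn word text) then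
    "Contract"
  else if (["payment", "remittance", "credit", "debit card", "bank"] : List String).any (fun word => PySem.Str.isIn word text) then
    "Payment"
  else if (["customs", "import", "export", "tariff", "declaration"] : List String).any (fun word => PySem.Str.isIn word text) then
    "Customs"
  else if (["licence", "license", "permit", "certificate", "authorization"] : List String).any (fun word => PySem.Str.isIn word text) then
    "License/Permit"
  else if (["transport", "carrier", "freight", "cargo"] : List String).any (fun word => PySem.Str.isIn word text) then
    "Transport"
  else if (["insurance", "policy", "claim"] : List String).any (fun word => PySem.Str.isIn word text) then
    "Insurance"
  else if (["warehouse", "storage", "inventory"] : List String).any (fun word => PySem.Str.isIn word text) then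
    "Warehouse"
  else if (["packing", "packaging", "container"] : List String).any (fun word => PySem.Str.isIn word text) then
    "Packaging"
  else if (["party", "customer", "supplier", "buyer", "seller"] : List String).any (fun word => PySem.Str.isIn word text) then
    "Party Identification"
  else if (["product", "item", "goods", "article", "commodity"] : List String).any (fun word => PySem.Str.isIn word text) then
    "Product"
  else if (["specification", "drawing", "design", "plan"] : List String).any (fun word => PySem.Str.isIn word text) then
    "Technical Document"
  else if (["test", "inspection", "quality", "analysis"] : List String).any (fun word => PySem.Str.isIn word text) then
    "Quality/Testing"
  else if (["tax", "duty", "vat"] : List String).any (fun word => PySem.Str.isIn word text) then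
    "Tax"
  else if (["account", "financial", "statement"] : List String).any (fun word => PySem.Str.isIn word text) then
    "Financial"
  else
    "Other Reference"

-- ===== PORT B =====
-- Source B's _LABELS
def pvLabels : List String :=
  [ "Invoice/Billing", "Order", "Delivery/Shipment", "Contract", "Payment",
    "Customs", "License/Permit", "Transport", "Insurance", "Warehouse",
    "Packaging", "Party Identification", "Product", "Technical Document",
    "Quality/Testing", "Tax", "Financial" ]

-- Source B's _KEYWORDS: flat keyword -> priority index
def pvKeywords : List (String × Nat) :=
  [ ("invoice", 0), ("bill", 0), ("credit note", 0), ("debit note", 0),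
    ("order", 1), ("purchase order", 1), ("quotation", 1), ("offer", 1),
    ("delivery", 2), ("despatch", 2), ("shipment", 2), ("waybill", 2), ("consignment", 2),
    ("contract", 3), ("agreement", 3), ("tender", 3),
    ("payment", 4), ("remittance", 4), ("credit", 4), ("debit card", 4), ("bank", 4),
    ("customs", 5), ("import", 5), ("export", 5), ("tariff", 5), ("declaration", 5),
    ("licence", 6), ("license", 6), ("permit", 6), ("certificate", 6), ("authorization", 6),
    ("transport", 7), ("carrier", 7), ("freight", 7), ("cargo", 7),
    ("insurance", 8), ("policy", 8), ("claim", 8),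
    ("warehouse", 9), ("storage", 9), ("inventory", 9),
    ("packing", 10), ("packaging", 10), ("container", 10),
    ("party", 11), ("customer", 11), ("supplier", 11), ("buyer", 11), ("seller", 11),
    ("product", 12), ("item", 12), ("goods", 12), ("article", 12), ("commodity", 12),
    ("specification", 13), ("drawing", 13), ("design", 13), ("plan", 13),
    ("test", 14), ("inspection", 14), ("quality", 14), ("analysis", 14),
    ("tax", 15), ("duty", 15), ("vat", 15),
    ("account", 16), ("financial", 16), ("statement", 16) ]

def categorize_reference_type_alt (code : String) (name : String) (description : String) : String :=
  if PySem.Str.startswith code "T" || (["80", "81", "380", "388"] : List String).contains code then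
    "Thai Extension"
  else
    let text := PySem.Str.lower (name ++ " " ++ description)
    -- hits = [i for (w, i) in _KEYWORDS if w in text]
    let hits := (pvKeywords.filter (fun q => PySem.Str.isIn q.1 text)).map Prod.snd
    -- _LABELS[min(hits)] if hits else 'Other Reference'; min(hits) is always a valid index, so getD is exact
    match PySem.List.min? hits (fun i => i) with
    | none => "Other Reference"
    | some i => pvLabels.getD i "Other Reference"

-- ===== PRECONDITION & SPEC =====
def Spec_categorize_reference_type (code : String) (name : String) (description : String) (out : String) : Prop := out = categorize_reference_type_alt code name description
instance (code : String) (name : String) (description : String) (out : String) : Decidable (Spec_categorize_reference_type code name description out) := by unfold Spec_categorize_reference_type; infer_instance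

-- ===== CLAIM (what is proved, stated in full; the proofs are below) =====
def Claim_equal_categorize_reference_type : Prop := ∀ (code : String) (name : String) (description : String), Dom_categorize_reference_type code name description → Spec_categorize_reference_type code name description (categorize_reference_type code name description)

-- ===== LEMMAS AND PROOFS =====

-- proof-side view of the category table (A's chain, grouped)
def pvCats : List (String × List String) :=
  [ ("Invoice/Billing", ["invoice", "bill", "credit note", "debit note"]),
    ("Order", ["order", "purchase order", "quotation", "offer"]),
    ("Delivery/Shipment", ["delivery", "despatch", "shipment", "waybill", "consignment"]),
    ("Contract", ["contract", "agreement", "tender"]),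
    ("Payment", ["payment", "remittance", "credit", "debit card", "bank"]),
    ("Customs", ["customs", "import", "export", "tariff", "declaration"]),
    ("License/Permit", ["licence", "license", "permit", "certificate", "authorization"]),
    ("Transport", ["transport", "carrier", "freight", "cargo"]),
    ("Insurance", ["insurance", "policy", "claim"]),
    ("Warehouse", ["warehouse", "storage", "inventory"]),
    ("Packaging", ["packing", "packaging", "container"]),
    ("Party Identification", ["party", "customer", "supplier", "buyer", "seller"]),
    ("Product", ["product", "item", "goods", "article", "commodity"]),
    ("Technical Document", ["specification", "drawing", "design", "plan"]),
    ("Quality/Testing", ["test", "inspection", "quality", "analysis"]),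
    ("Tax", ["tax", "duty", "vat"]),
    ("Financial", ["account", "financial", "statement"]) ]

-- flatten a category table starting at index k (so that pvKeywords = pvFlat 0 pvCats)
def pvFlat (k : Nat) : List (String × List String) → List (String × Nat)
  | [] => []
  | (_, kws) :: rest => kws.map (fun w => (w, k)) ++ pvFlat (k + 1) rest

-- first-match scan over a category table (A's elif chain, abstractly)
def pvScan (p : String → Bool) : List (String × List String) → String
  | [] => "Other Reference"
  | (label, kws) :: rest => if kws.any p then label else pvScan p rest

lemma pvFlat_snd_ge (p : String → Bool) : ∀ (cats : List (String × List String)) (k : Nat)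
    (x : Nat), x ∈ ((pvFlat k cats).filter (fun q => p q.1)).map Prod.snd → k ≤ x := by
  intro cats
  induction cats with
  | nil => intro k x hx; simp [pvFlat] at hx
  | cons c rest ih =>
    intro k x hx
    obtain ⟨label, kws⟩ := c
    simp only [pvFlat, List.filter_append, List.map_append, List.mem_append] at hx
    rcases hx with h | h
    · simp only [List.mem_map] at h
      obtain ⟨q, hq, hq2⟩ := h
      have := List.mem_filter.mp hq
      obtain ⟨w, hw, hwq⟩ := List.mem_map.mp this.1
      subst hwq; subst hq2; exact le_refl k
    · exact Nat.le_of_succ_le (ih (k + 1) x h)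

lemma pvMin_of_mem_of_le (l : List Nat) (k : Nat) (hk : k ∈ l) (hle : ∀ x ∈ l, k ≤ x) :
    PySem.List.min? l (fun i => i) = some k := by
  cases l with
  | nil => simp at hk
  | cons a t =>
    have h := PySem.List.min?_id_cons (x := a) (t := t)
    rw [h]
    have hm := PySem.List.foldl_min_mem (t := t) (a := a)
    have hl := PySem.List.foldl_min_le (t := t) (a := a)
    have h1 : k ≤ t.foldl min a := by
      rcases hm with h | h
      · rw [h]; exact hle a (by simp)
      · exact hle _ (List.mem_cons_of_mem _ h)
    have h2 : t.foldl min a ≤ k := by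
      rcases List.mem_cons.mp hk with h | h
      · subst h; exact hl.1
      · exact hl.2 k h
    exact congrArg some (Nat.le_antisymm h2 h1)

lemma pvScan_eq (p : String → Bool) : ∀ (cats : List (String × List String)) (k : Nat),
    (match PySem.List.min? (((pvFlat k cats).filter (fun q => p q.1)).map Prod.snd) (fun i => i) with
     | none => "Other Reference"
     | some i => (cats.map Prod.fst).getD (i - k) "Other Reference") = pvScan p cats := by
  intro cats
  induction cats with
  | nil => intro k; simp [pvFlat, pvScan, PySem.List.min?]
  | cons c rest ih =>
    intro k
    obtain ⟨label, kws⟩ := c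
    simp only [pvFlat, pvScan, List.filter_append, List.map_append]
    by_cases hany : kws.any p
    · -- some keyword of the head category matches: min is k
      obtain ⟨w, hw, hpw⟩ := List.any_eq_true.mp hany
      have hkmem : (k : Nat) ∈ (((kws.map (fun w => (w, k))).filter (fun q => p q.1)).map Prod.snd)
          ++ ((pvFlat (k + 1) rest).filter (fun q => p q.1)).map Prod.snd := by
        apply List.mem_append_left
        exact List.mem_map.mpr ⟨(w, k), List.mem_filter.mpr ⟨List.mem_map.mpr ⟨w, hw, rfl⟩, hpw⟩, rfl⟩
      have hall : ∀ x ∈ (((kws.map (fun w => (w, k))).filter (fun q => p q.1)).map Prod.snd)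
          ++ ((pvFlat (k + 1) rest).filter (fun q => p q.1)).map Prod.snd, k ≤ x := by
        intro x hx
        rcases List.mem_append.mp hx with h | h
        · obtain ⟨q, hq, hq2⟩ := List.mem_map.mp h
          have := List.mem_filter.mp hq
          obtain ⟨w', _, hwq⟩ := List.mem_map.mp this.1
          subst hwq; subst hq2; exact le_refl k
        · exact Nat.le_of_succ_le (pvFlat_snd_ge p rest (k + 1) x h)
      rw [pvMin_of_mem_of_le _ k hkmem hall]
      simp [hany]
    · -- head category does not match: its keywords are all filtered out
      have hnone : (kws.map (fun w => (w, k))).filter (fun q => p q.1) = [] := by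
        apply List.filter_eq_nil_iff.mpr
        intro q hq
        obtain ⟨w, hw, hwq⟩ := List.mem_map.mp hq
        subst hwq
        simp only [Bool.not_eq_true]
        have := List.any_eq_false.mp (Bool.not_eq_true _ ▸ hany) w hw
        exact Bool.eq_false_iff.mpr this
      rw [hnone]
      simp only [List.map_nil, List.nil_append]
      have := ih (k + 1)
      rw [Bool.eq_false_iff.mpr hany] at *
      simp only [Bool.false_eq_true, if_false]
      rw [← this]
      -- align the getD index shift
      cases hmin : PySem.List.min? (((pvFlat (k + 1) rest).filter (fun q => p q.1)).map Prod.snd) (fun i => i) with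
      | none => rfl
      | some i =>
        have hi : k + 1 ≤ i := pvFlat_snd_ge p rest (k + 1) i (PySem.List.min?_mem hmin)
        simp only [List.map_cons]
        have h1 : i - k = (i - (k + 1)) + 1 := by omega
        rw [h1]
        rfl

-- ===== VERDICT (by name: the statement is the Claim_ definition above) =====
theorem categorize_reference_type_spec : Claim_equal_categorize_reference_type := by
  intro code name description _
  unfold Spec_categorize_reference_type categorize_reference_type categorize_reference_type_alt
  by_cases hthai : (PySem.Str.startswith code "T" || (["80", "81", "380", "388"] : List String).contains code) = true
  · rw [if_pos hthai, if_pos hthai]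
  · simp only [Bool.not_eq_true] at hthai
    simp only [hthai, Bool.false_eq_true, if_false]
    set text := PySem.Str.lower (name ++ " " ++ description) with htext
    have hflat : pvKeywords = pvFlat 0 pvCats := by decide
    have hlab : pvLabels = pvCats.map Prod.fst := by decide
    rw [hflat, hlab]
    have := pvScan_eq (fun w => PySem.Str.isIn w text) pvCats 0
    simp only [Nat.sub_zero] at this
    rw [this]
    simp only [pvScan, pvCats]
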